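-- pv_equiv track=rewrite | github.com/michaelcdippenaar/property_manager | backend/apps/properties/tasks.py | _normalise_doc_type
-- ===== SOURCE A (Python) =====
-- def _normalise_doc_type(raw: str) -> str:
--     """Map classifier labels like 'CoR14.3' to snake_case keys."""
--     if not raw:
--         return "other"
--     s = raw.strip().lower()
--     s = s.replace(".", "_").replace("-", "_").replace(" ", "_").replace("/", "_")
--     while "__" in s:
--         s = s.replace("__", "_")
--     return s.strip("_") or "other"
-- ===== SOURCE B (Python) =====
-- def _normalise_doc_type(raw: str) -> str:
--     """Map classifier labels like 'CoR14.3' to snake_case keys."""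
--     if not raw:
--         return "other"
--     out = []
--     for c in raw.strip().lower():
--         if c in "._- /":
--             if out and out[-1] != "_":
--                 out.append("_")
--         else:
--             out.append(c)
--     if out and out[-1] == "_":
--         out.pop()
--     return "".join(out) or "other"
-- ===== Notes on version B (the rewrite author's own statement) =====
-- stated objective: simpler
-- what changed: B replaces A's four sequential .replace passes, the repeated-replace while-loop that collapses underscore runs, and the final two-sided strip of underscores by a single left-to-right scan that substitutes separators, collapses runs and trims in one pass.
import Mathlib
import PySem

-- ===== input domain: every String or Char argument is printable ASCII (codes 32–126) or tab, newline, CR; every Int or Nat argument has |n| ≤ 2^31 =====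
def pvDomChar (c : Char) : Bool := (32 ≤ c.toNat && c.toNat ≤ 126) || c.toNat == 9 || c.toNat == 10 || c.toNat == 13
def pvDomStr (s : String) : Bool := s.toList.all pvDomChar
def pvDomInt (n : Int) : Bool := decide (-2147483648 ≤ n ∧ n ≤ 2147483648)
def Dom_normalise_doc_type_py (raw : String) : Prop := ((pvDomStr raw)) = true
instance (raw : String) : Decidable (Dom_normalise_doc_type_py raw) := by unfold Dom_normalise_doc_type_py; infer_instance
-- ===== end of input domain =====

-- B replaces A's four .replace passes plus the '__'-collapsing while-loop by one
-- left-to-right scan that substitutes, collapses and trims in a single pass (objective: simpler).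

-- ===== PORT A =====
-- helpers for A's `while "__" in s: s = s.replace("__", "_")` loop
-- (the loop's termination proof needs them above the port, which cites them by name)

/-- exact effect of one Python `s.replace("__", "_")` pass (non-overlapping, left to right). -/
def pvHalve : List Char → List Char
  | '_' :: '_' :: t => '_' :: pvHalve t
  | c :: t => c :: pvHalve t
  | [] => []

/-- `"__" in s` as a structural predicate. -/
def pvHasDD : List Char → Bool
  | '_' :: '_' :: _ => true
  | _ :: t => pvHasDD t
  | [] => false

theorem pvHalve_cons₂ (c d : Char) (t : List Char) (h : ¬(c = '_' ∧ d = '_')) :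
    pvHalve (c :: d :: t) = c :: pvHalve (d :: t) := by
  rw [pvHalve.eq_def]; split <;> simp_all

theorem pvHasDD_cons₂ (c d : Char) (t : List Char) (h : ¬(c = '_' ∧ d = '_')) :
    pvHasDD (c :: d :: t) = pvHasDD (d :: t) := by
  rw [pvHasDD.eq_def]; split <;> simp_all

theorem pvHasDD_singleton (c : Char) : pvHasDD [c] = false := by
  rw [pvHasDD.eq_def]; split <;> simp_all [pvHasDD]

theorem pvHalve_cons (c : Char) (t : List Char)
    (h : ∀ t₁, c = '_' → t = '_' :: t₁ → False) : pvHalve (c :: t) = c :: pvHalve t := by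
  match t with
  | [] => rw [pvHalve.eq_def]; split <;> simp_all [pvHalve]
  | d :: t' => exact pvHalve_cons₂ c d t' (fun hh => h t' hh.1 (by rw [hh.2]))

theorem pvHasDD_consH (c : Char) (t : List Char)
    (h : ∀ t₁, c = '_' → t = '_' :: t₁ → False) : pvHasDD (c :: t) = pvHasDD t := by
  match t with
  | [] => rw [pvHasDD_singleton]; rfl
  | d :: t' => exact pvHasDD_cons₂ c d t' (fun hh => h t' hh.1 (by rw [hh.2]))

theorem pvReplaceGo_dd (fuel : Nat) : ∀ (l acc : List Char), l.length ≤ fuel →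
    PySem.Chars.replace.go ['_', '_'] ['_'] fuel l acc = acc.reverse ++ pvHalve l := by
  induction fuel with
  | zero => intro l acc h; rw [PySem.Chars.replace.go]; cases l <;> simp_all [pvHalve]
  | succ n ih =>
    intro l acc h
    match l with
    | [] => rw [PySem.Chars.replace.go] <;> simp [pvHalve]
    | [c] =>
      rw [PySem.Chars.replace.go]
      rw [if_neg (by simp [List.isPrefixOf])]
      rw [ih [] (c :: acc) (by simp)]
      simp [pvHalve]
    | c :: d :: t =>
      rw [PySem.Chars.replace.go]
      by_cases hcd : c = '_' ∧ d = '_'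
      · obtain ⟨rfl, rfl⟩ := hcd
        rw [if_pos (by simp [List.isPrefixOf])]
        have hd : List.drop (['_', '_'] : List Char).length ('_' :: '_' :: t) = t := rfl
        have hr : (['_'] : List Char).reverse = ['_'] := rfl
        rw [hd, hr]
        simp only [List.singleton_append]
        rw [ih t ('_' :: acc) (by simp at h ⊢; omega)]
        simp [pvHalve]
      · rw [if_neg ?hpre]
        case hpre =>
          simp only [List.isPrefixOf, Bool.and_eq_true, beq_iff_eq]
          intro hh
          exact hcd ⟨hh.1.symm, hh.2.1.symm⟩
        rw [ih (d :: t) (c :: acc) (by simp at h ⊢; omega)]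
        rw [pvHalve_cons₂ c d t hcd]
        simp
theorem pvReplace_dd (l : List Char) :
    PySem.Chars.replace l ['_', '_'] ['_'] = pvHalve l := by
  rw [PySem.Chars.replace]
  rw [if_neg (by simp)]
  exact pvReplaceGo_dd l.length l [] le_rfl

theorem pvHasDD_iff_infix (l : List Char) : pvHasDD l = true ↔ ['_', '_'] <:+: l := by
  induction l with
  | nil => simp [pvHasDD]
  | cons c t ih =>
    match t with
    | [] =>
      rw [pvHasDD_singleton]
      constructor
      · intro h; exact absurd h (by simp)
      · intro h; have := h.length_le; simp at this
    | d :: t' =>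
      by_cases hcd : c = '_' ∧ d = '_'
      · obtain ⟨rfl, rfl⟩ := hcd
        constructor
        · intro _; exact ⟨[], t', by simp⟩
        · intro _; rw [pvHasDD]
      · rw [pvHasDD_cons₂ c d t' hcd, ih]
        constructor
        · rintro ⟨pre, suf, hE⟩; exact ⟨c :: pre, suf, by simp [hE]⟩
        · intro hi
          rcases List.infix_cons_iff.mp hi with hp | hi2
          · rw [List.cons_prefix_cons] at hp
            obtain ⟨h1, hp2⟩ := hp
            rw [List.cons_prefix_cons] at hp2
            exact absurd ⟨h1.symm, hp2.1.symm⟩ hcd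
          · exact hi2

theorem pvHalve_length_le (l : List Char) : (pvHalve l).length ≤ l.length := by
  induction l using pvHalve.induct with
  | case1 t ih => simp [pvHalve]; omega
  | case2 c t h ih => rw [pvHalve_cons c t h]; simp; omega
  | case3 => simp [pvHalve]

theorem pvHalve_length (l : List Char) (h : pvHasDD l = true) :
    (pvHalve l).length < l.length := by
  induction l using pvHalve.induct with
  | case1 t ih =>
    have := pvHalve_length_le t
    simp [pvHalve]; omega
  | case2 c t hne ih =>
    rw [pvHalve_cons c t hne]
    rw [pvHasDD_consH c t hne] at h
    have := ih h
    simp; omega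
  | case3 => simp [pvHasDD] at h

theorem pvIsIn_dd (s : String) : PySem.Str.isIn "__" s = pvHasDD s.toList := by
  have h1 := PySem.Str.isIn_iff_infix "__" s
  have h2 := pvHasDD_iff_infix s.toList
  have h3 : ("__" : String).toList = ['_', '_'] := rfl
  rw [h3] at h1
  cases hb : pvHasDD s.toList
  · rw [hb] at h2
    simp only [Bool.false_eq_true, false_iff] at h2
    exact Bool.eq_false_iff.mpr (fun hs => h2 (h1.mp hs))
  · rw [hb] at h2
    exact h1.mpr (h2.mp rfl)

/-- A's while-loop: `while "__" in s: s = s.replace("__", "_")`. -/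
def pvCollapseLoop (s : String) : String :=
  if PySem.Str.isIn "__" s then pvCollapseLoop (PySem.Str.replace s "__" "_") else s
termination_by s.toList.length
decreasing_by
  rename_i h
  rw [pvIsIn_dd] at h
  have hr := PySem.Str.toList_replace s "__" "_"
  have h2 : ("__" : String).toList = ['_', '_'] := rfl
  have h3 : ("_" : String).toList = ['_'] := rfl
  rw [h2, h3, pvReplace_dd] at hr
  rw [hr]
  exact pvHalve_length _ h

def normalise_doc_type_py (raw : String) : String :=
  if raw = "" then "other"
  else
    let s := PySem.Str.lower (PySem.Str.strip raw)
    let s := PySem.Str.replace (PySem.Str.replace (PySem.Str.replace (PySem.Str.replace s "." "_") "-" "_") " " "_") "/" "_"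
    let s := pvCollapseLoop s
    let r := PySem.Str.stripChars s "_"
    if r = "" then "other" else r

-- ===== PORT B =====
def normalise_doc_type_py_alt (raw : String) : String :=
  if raw = "" then "other"
  else
    let out := (PySem.Chars.lower (PySem.Chars.strip raw.toList)).foldl
      (fun acc c =>
        if PySem.Chars.isIn [c] "._- /".toList then
          (if acc ≠ [] ∧ acc.getLast? ≠ some '_' then acc ++ ['_'] else acc)
        else acc ++ [c]) []
    let out := if out ≠ [] ∧ out.getLast? = some '_' then out.dropLast else out
    if out = [] then "other" else String.ofList out

-- ===== PRECONDITION & SPEC =====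
def Spec_normalise_doc_type_py (raw : String) (out : String) : Prop := out = normalise_doc_type_py_alt raw
instance (raw : String) (out : String) : Decidable (Spec_normalise_doc_type_py raw out) := by unfold Spec_normalise_doc_type_py; infer_instance

-- ===== CLAIM (what is proved, stated in full; the proofs are below) =====
def Claim_equal_normalise_doc_type_py : Prop := ∀ (raw : String), Dom_normalise_doc_type_py raw → Spec_normalise_doc_type_py raw (normalise_doc_type_py raw)

-- ===== LEMMAS AND PROOFS =====

/-- the composed effect of A's four `.replace(c, "_")` passes. -/
def pvSub (c : Char) : Char := if c = '.' ∨ c = '-' ∨ c = ' ' ∨ c = '/' then '_' else c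

/-- collapse consecutive underscores; the flag says "the previously kept char was an underscore". -/
def pvCollapse (b : Bool) : List Char → List Char
  | [] => []
  | c :: t => if c = '_' then (if b then pvCollapse true t else '_' :: pvCollapse true t)
              else c :: pvCollapse false t

/-- B's scan as a flag-passing recursion; the flag says "an underscore may be emitted". -/
def pvB (b : Bool) : List Char → List Char
  | [] => []
  | c :: t => if c = '.' ∨ c = '_' ∨ c = '-' ∨ c = ' ' ∨ c = '/' then
                (if b then '_' :: pvB false t else pvB false t)
              else c :: pvB true t

theorem pvReplaceGo_single (a b : Char) (fuel : Nat) : ∀ (l acc : List Char), l.length ≤ fuel →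
    PySem.Chars.replace.go [a] [b] fuel l acc =
      acc.reverse ++ l.map (fun c => if c = a then b else c) := by
  induction fuel with
  | zero => intro l acc h; rw [PySem.Chars.replace.go]; cases l <;> simp_all
  | succ n ih =>
    intro l acc h
    match l with
    | [] => rw [PySem.Chars.replace.go] <;> simp
    | c :: t =>
      rw [PySem.Chars.replace.go]
      by_cases hc : c = a
      · subst hc
        rw [if_pos (by simp [List.isPrefixOf])]
        have hd : List.drop ([c] : List Char).length (c :: t) = t := rfl
        have hr : ([b] : List Char).reverse = [b] := rfl
        rw [hd, hr]
        simp only [List.singleton_append]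
        rw [ih t (b :: acc) (by simp at h ⊢; omega)]
        simp
      · rw [if_neg (by simp [List.isPrefixOf]; intro hh; exact hc hh.symm)]
        rw [ih t (c :: acc) (by simp at h ⊢; omega)]
        simp [hc]

theorem pvReplace_single (a b : Char) (l : List Char) :
    PySem.Chars.replace l [a] [b] = l.map (fun c => if c = a then b else c) := by
  rw [PySem.Chars.replace]
  rw [if_neg (by simp)]
  exact pvReplaceGo_single a b l.length l [] le_rfl

theorem pvCollapse_cons_us (b : Bool) (t : List Char) :
    pvCollapse b ('_' :: t) = if b then pvCollapse true t else '_' :: pvCollapse true t := by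
  simp [pvCollapse]

theorem pvCollapse_cons_ne (b : Bool) (c : Char) (t : List Char) (hc : c ≠ '_') :
    pvCollapse b (c :: t) = c :: pvCollapse false t := by
  simp [pvCollapse, hc]

theorem pvB_cons_sep (b : Bool) (c : Char) (t : List Char)
    (h : c = '.' ∨ c = '_' ∨ c = '-' ∨ c = ' ' ∨ c = '/') :
    pvB b (c :: t) = if b then '_' :: pvB false t else pvB false t := by
  simp only [pvB]
  rw [if_pos h]

theorem pvB_cons_nonsep (b : Bool) (c : Char) (t : List Char)
    (h : ¬(c = '.' ∨ c = '_' ∨ c = '-' ∨ c = ' ' ∨ c = '/')) :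
    pvB b (c :: t) = c :: pvB true t := by
  simp only [pvB]
  rw [if_neg h]

theorem pvCollapse_halve (l : List Char) : ∀ b, pvCollapse b (pvHalve l) = pvCollapse b l := by
  induction l using pvHalve.induct with
  | case1 t ih =>
    intro b
    have h1 : pvHalve ('_' :: '_' :: t) = '_' :: pvHalve t := by rw [pvHalve]
    rw [h1, pvCollapse_cons_us, pvCollapse_cons_us, pvCollapse_cons_us, ih true]
    cases b <;> simp [pvCollapse_cons_us, ih true]
  | case2 c t h ih =>
    intro b
    rw [pvHalve_cons c t h]
    by_cases hc : c = '_'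
    · subst hc
      rw [pvCollapse_cons_us, pvCollapse_cons_us, ih true]
    · rw [pvCollapse_cons_ne b c _ hc, pvCollapse_cons_ne b c _ hc, ih false]
  | case3 => intro b; rfl

theorem pvCollapse_noDD (l : List Char) (h : pvHasDD l = false) :
    pvCollapse false l = l ∧ (l.head? ≠ some '_' → pvCollapse true l = l) := by
  induction l with
  | nil => simp [pvCollapse]
  | cons c t ih =>
    by_cases hc : c = '_'
    · subst hc
      have ht : t.head? ≠ some '_' := by
        match t with
        | [] => simp
        | d :: t' =>
          intro hcontra
          simp at hcontra
          subst hcontra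
          rw [pvHasDD] at h
          simp at h
      have hdd : pvHasDD t = false := by
        match t with
        | [] => rfl
        | d :: t' =>
          rwa [pvHasDD_cons₂ '_' d t' (fun hh => ht (by simp [hh.2]))] at h
      obtain ⟨ih1, ih2⟩ := ih hdd
      refine ⟨?_, fun hcontra => (hcontra rfl).elim⟩
      rw [pvCollapse_cons_us, if_neg (by simp), ih2 ht]
    · have hdd : pvHasDD t = false := by
        match t with
        | [] => rfl
        | d :: t' => rwa [pvHasDD_cons₂ c d t' (fun hh => hc hh.1)] at h
      obtain ⟨ih1, _⟩ := ih hdd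
      constructor
      · rw [pvCollapse_cons_ne _ _ _ hc, ih1]
      · intro _; rw [pvCollapse_cons_ne _ _ _ hc, ih1]

theorem pvCollapseLoop_eq (s : String) :
    (pvCollapseLoop s).toList = pvCollapse false s.toList := by
  induction s using pvCollapseLoop.induct with
  | case1 s hin ih =>
    rw [pvCollapseLoop, if_pos hin]
    rw [ih]
    have hr := PySem.Str.toList_replace s "__" "_"
    have h2 : ("__" : String).toList = ['_', '_'] := rfl
    have h3 : ("_" : String).toList = ['_'] := rfl
    rw [h2, h3, pvReplace_dd] at hr
    rw [hr, pvCollapse_halve]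
  | case2 s hin =>
    rw [pvCollapseLoop, if_neg hin]
    rw [pvIsIn_dd] at hin
    simp only [Bool.not_eq_true] at hin
    exact (pvCollapse_noDD s.toList hin).1.symm

theorem pvSep_iff (c : Char) :
    PySem.Chars.isIn [c] ("._- /" : String).toList = true ↔
      (c = '.' ∨ c = '_' ∨ c = '-' ∨ c = ' ' ∨ c = '/') := by
  rw [PySem.Chars.isIn_iff_infix, List.singleton_infix_iff]
  have h : ("._- /" : String).toList = ['.', '_', '-', ' ', '/'] := rfl
  rw [h]
  simp

theorem pvFold_eq (t : List Char) : ∀ (acc : List Char),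
    t.foldl (fun acc c =>
        if PySem.Chars.isIn [c] "._- /".toList then
          (if acc ≠ [] ∧ acc.getLast? ≠ some '_' then acc ++ ['_'] else acc)
        else acc ++ [c]) acc =
      acc ++ pvB (decide (acc ≠ [] ∧ acc.getLast? ≠ some '_')) t := by
  induction t with
  | nil => intro acc; simp [pvB]
  | cons c t ih =>
    intro acc
    rw [List.foldl_cons]
    by_cases hsep : c = '.' ∨ c = '_' ∨ c = '-' ∨ c = ' ' ∨ c = '/'
    · rw [if_pos ((pvSep_iff c).mpr hsep)]
      rw [pvB_cons_sep _ c t hsep]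
      by_cases hacc : acc ≠ [] ∧ acc.getLast? ≠ some '_'
      · rw [if_pos hacc, ih]
        have h1 : (decide ((acc ++ ['_']) ≠ [] ∧ (acc ++ ['_']).getLast? ≠ some '_')) = false := by
          simp [List.getLast?_concat]
        have h2 : (decide (acc ≠ [] ∧ acc.getLast? ≠ some '_')) = true := by
          simpa using hacc
        rw [h1, h2]
        simp
      · rw [if_neg hacc, ih]
        have h0 : (decide (acc ≠ [] ∧ acc.getLast? ≠ some '_')) = false := by
          simpa using hacc
        rw [h0]
        simp
    · rw [if_neg (fun hh => hsep ((pvSep_iff c).mp hh)), ih]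
      rw [pvB_cons_nonsep _ c t hsep]
      have hc : c ≠ '_' := fun hh => hsep (Or.inr (Or.inl hh))
      have h1 : (decide ((acc ++ [c]) ≠ [] ∧ (acc ++ [c]).getLast? ≠ some '_')) = true := by
        simp [List.getLast?_concat, hc]
      rw [h1]
      simp

theorem pvB_eq_collapse (t : List Char) : ∀ b, pvB b t = pvCollapse (!b) (t.map pvSub) := by
  induction t with
  | nil => intro b; rfl
  | cons c t ih =>
    intro b
    by_cases hsep : c = '.' ∨ c = '_' ∨ c = '-' ∨ c = ' ' ∨ c = '/'
    · have hsub : pvSub c = '_' := by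
        rcases hsep with h | h | h | h | h <;> subst h <;> rfl
      rw [pvB_cons_sep b c t hsep, List.map_cons, hsub, pvCollapse_cons_us, ih false]
      cases b <;> simp
    · have hc : c ≠ '_' := fun hh => hsep (Or.inr (Or.inl hh))
      have hsub : pvSub c = c := by
        rw [pvSub, if_neg (by tauto)]
      rw [pvB_cons_nonsep b c t hsep, List.map_cons, hsub, pvCollapse_cons_ne _ _ _ hc, ih true]
      simp

theorem pvCollapse_true_head (m : List Char) : (pvCollapse true m).head? ≠ some '_' := by
  induction m with
  | nil => simp [pvCollapse]
  | cons c t ih =>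
    by_cases hc : c = '_'
    · subst hc; rw [pvCollapse_cons_us, if_pos rfl]; exact ih
    · rw [pvCollapse_cons_ne _ _ _ hc]
      simp [hc]

theorem pvHasDD_cons_head (c : Char) (t : List Char) (h : ¬(c = '_' ∧ t.head? = some '_')) :
    pvHasDD (c :: t) = pvHasDD t := by
  match t with
  | [] => rw [pvHasDD_singleton]; rfl
  | d :: t' => exact pvHasDD_cons₂ c d t' (fun hh => h ⟨hh.1, by simp [hh.2]⟩)

theorem pvCollapse_noDD_out (m : List Char) : ∀ b, pvHasDD (pvCollapse b m) = false := by
  induction m with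
  | nil => intro b; rfl
  | cons c t ih =>
    intro b
    by_cases hc : c = '_'
    · subst hc
      rw [pvCollapse_cons_us]
      cases b
      · rw [if_neg (by simp)]
        rw [pvHasDD_cons_head '_' _ (fun hh => pvCollapse_true_head t hh.2)]
        exact ih true
      · rw [if_pos rfl]; exact ih true
    · rw [pvCollapse_cons_ne _ _ _ hc]
      rw [pvHasDD_cons_head c _ (fun hh => hc hh.1)]
      exact ih false

theorem pvDropWhile_head (l : List Char) (h : l.head? ≠ some '_') :
    List.dropWhile (fun c => List.contains ['_'] c) l = l := by
  match l with
  | [] => rfl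
  | c :: t =>
    have hc : c ≠ '_' := by simp at h; exact fun hh => h (by rw [hh])
    rw [List.dropWhile_cons, if_neg (by simp [hc])]

theorem pvDropWhile_false_true (m : List Char) :
    List.dropWhile (fun c => List.contains ['_'] c) (pvCollapse false m) = pvCollapse true m := by
  match m with
  | [] => rfl
  | c :: t =>
    by_cases hc : c = '_'
    · subst hc
      rw [pvCollapse_cons_us, if_neg (by simp), pvCollapse_cons_us, if_pos rfl]
      rw [List.dropWhile_cons, if_pos (by simp)]
      exact pvDropWhile_head _ (pvCollapse_true_head t)
    · rw [pvCollapse_cons_ne _ _ _ hc, pvCollapse_cons_ne _ _ _ hc]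
      rw [List.dropWhile_cons, if_neg (by simp [hc])]

theorem pvHasDD_dd (t : List Char) : pvHasDD ('_' :: '_' :: t) = true := rfl

theorem pvHasDD_concat_dd (zs : List Char) : pvHasDD (zs ++ ['_', '_']) = true := by
  induction zs with
  | nil => exact pvHasDD_dd []
  | cons c t ih =>
    rw [List.cons_append]
    match h : t ++ ['_', '_'] with
    | [] => simp at h
    | d :: t' =>
      by_cases hcd : c = '_' ∧ d = '_'
      · obtain ⟨rfl, rfl⟩ := hcd; exact pvHasDD_dd t'
      · rw [pvHasDD_cons₂ c d t' hcd, ← h, ih]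

theorem pvRstrip_pop (x : List Char) (hdd : pvHasDD x = false) (hh : x.head? ≠ some '_') :
    (List.dropWhile (fun c => List.contains ['_'] c) x.reverse).reverse =
      (if x ≠ [] ∧ x.getLast? = some '_' then x.dropLast else x) := by
  rcases List.eq_nil_or_concat x with rfl | ⟨ys, c, rfl⟩
  · simp
  · rw [List.concat_eq_append]
    by_cases hc : c = '_'
    · subst hc
      rw [if_pos (by simp [List.getLast?_concat])]
      rw [List.dropLast_concat]
      rw [List.reverse_append]
      simp only [List.reverse_cons, List.reverse_nil, List.nil_append, List.cons_append,
        List.singleton_append]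
      rw [List.dropWhile_cons, if_pos (by simp)]
      rw [pvDropWhile_head _ ?_, List.reverse_reverse]
      rcases List.eq_nil_or_concat ys with rfl | ⟨zs, d, rfl⟩
      · simp at hh
      · rw [List.concat_eq_append, List.reverse_append]
        have hd : d ≠ '_' := by
          intro hd; subst hd
          have hco := pvHasDD_concat_dd zs
          simp only [List.concat_eq_append, List.append_assoc, List.singleton_append,
            List.cons_append, List.nil_append] at hdd hco
          rw [hco] at hdd
          exact absurd hdd (by simp)
        simp [hd]
    · rw [if_neg (by simp [List.getLast?_concat, hc])]
      rw [List.reverse_append]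
      simp only [List.reverse_cons, List.reverse_nil, List.nil_append, List.cons_append,
        List.singleton_append]
      rw [List.dropWhile_cons, if_neg (by simp [hc])]
      simp

theorem pvStripChars_def (l : List Char) :
    PySem.Chars.stripChars l ['_'] =
      (List.dropWhile (fun c => List.contains ['_'] c)
        (List.dropWhile (fun c => List.contains ['_'] c) l).reverse).reverse := by
  rfl

theorem pvStrip_eq_pop (m : List Char) :
    PySem.Chars.stripChars (pvCollapse false m) ['_'] =
      (if pvCollapse true m ≠ [] ∧ (pvCollapse true m).getLast? = some '_'
       then (pvCollapse true m).dropLast else pvCollapse true m) := by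
  rw [pvStripChars_def, pvDropWhile_false_true]
  exact pvRstrip_pop _ (pvCollapse_noDD_out m true) (pvCollapse_true_head m)

theorem pvSub_comp (c : Char) :
    (if (if (if (if c = '.' then '_' else c) = '-' then '_'
         else (if c = '.' then '_' else c)) = ' ' then '_'
         else (if (if c = '.' then '_' else c) = '-' then '_' else (if c = '.' then '_' else c))) = '/'
       then '_'
       else (if (if (if c = '.' then '_' else c) = '-' then '_'
            else (if c = '.' then '_' else c)) = ' ' then '_'
            else (if (if c = '.' then '_' else c) = '-' then '_' else (if c = '.' then '_' else c)))) =
      pvSub c := by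
  by_cases h1 : c = '.' <;> by_cases h2 : c = '-' <;> by_cases h3 : c = ' ' <;>
    by_cases h4 : c = '/' <;> simp_all [pvSub] <;> decide

-- ===== VERDICT (by name: the statement is the Claim_ definition above) =====
theorem normalise_doc_type_py_spec : Claim_equal_normalise_doc_type_py := by
  intro raw _
  unfold Spec_normalise_doc_type_py normalise_doc_type_py normalise_doc_type_py_alt
  by_cases hraw : raw = ""
  · rw [if_pos hraw, if_pos hraw]
  · rw [if_neg hraw, if_neg hraw]
    simp only []
    -- name the common pieces
    set t : List Char := PySem.Chars.lower (PySem.Chars.strip raw.toList) with ht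
    -- A side: the four replaces are map pvSub on t
    have hAmap :
        (PySem.Str.replace (PySem.Str.replace (PySem.Str.replace
          (PySem.Str.replace (PySem.Str.lower (PySem.Str.strip raw)) "." "_") "-" "_") " " "_") "/" "_").toList
          = t.map pvSub := by
      rw [PySem.Str.toList_replace, PySem.Str.toList_replace, PySem.Str.toList_replace,
        PySem.Str.toList_replace]
      have hl : (PySem.Str.lower (PySem.Str.strip raw)).toList = t := by
        rw [PySem.Str.toList_lower, PySem.Str.toList_strip]
      rw [hl]
      show PySem.Chars.replace (PySem.Chars.replace (PySem.Chars.replace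
        (PySem.Chars.replace t ['.'] ['_']) ['-'] ['_']) [' '] ['_']) ['/'] ['_'] = t.map pvSub
      rw [pvReplace_single, pvReplace_single, pvReplace_single, pvReplace_single]
      rw [List.map_map, List.map_map, List.map_map]
      apply List.map_congr_left
      intro c _
      simp only [Function.comp]
      exact pvSub_comp c
    -- A's result list
    have hA : (PySem.Str.stripChars (pvCollapseLoop
        (PySem.Str.replace (PySem.Str.replace (PySem.Str.replace
          (PySem.Str.replace (PySem.Str.lower (PySem.Str.strip raw)) "." "_") "-" "_") " " "_") "/" "_")) "_").toList
        = (if pvCollapse true (t.map pvSub) ≠ [] ∧ (pvCollapse true (t.map pvSub)).getLast? = some '_'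
           then (pvCollapse true (t.map pvSub)).dropLast else pvCollapse true (t.map pvSub)) := by
      rw [PySem.Str.toList_stripChars]
      have h3 : ("_" : String).toList = ['_'] := rfl
      rw [h3, pvCollapseLoop_eq, hAmap, pvStrip_eq_pop]
    -- B's result list
    have hB : ((PySem.Chars.lower (PySem.Chars.strip raw.toList)).foldl
        (fun acc c =>
          if PySem.Chars.isIn [c] "._- /".toList then
            (if acc ≠ [] ∧ acc.getLast? ≠ some '_' then acc ++ ['_'] else acc)
          else acc ++ [c]) []) = pvCollapse true (t.map pvSub) := by
      rw [← ht, pvFold_eq t []]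
      simp only [List.nil_append]
      have : (decide (([] : List Char) ≠ [] ∧ ([] : List Char).getLast? ≠ some '_')) = false := by
        decide
      rw [this, pvB_eq_collapse t false]
      rfl
    rw [hB]
    -- both sides are now the same list computation; finish by cases on the final emptiness test
    set res : List Char :=
      (if pvCollapse true (t.map pvSub) ≠ [] ∧ (pvCollapse true (t.map pvSub)).getLast? = some '_'
       then (pvCollapse true (t.map pvSub)).dropLast else pvCollapse true (t.map pvSub)) with hres
    have hAs : PySem.Str.stripChars (pvCollapseLoop
        (PySem.Str.replace (PySem.Str.replace (PySem.Str.replace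
          (PySem.Str.replace (PySem.Str.lower (PySem.Str.strip raw)) "." "_") "-" "_") " " "_") "/" "_")) "_"
        = String.ofList res := by
      rw [← hA, String.ofList_toList]
    rw [hAs]
    by_cases hempty : res = []
    · rw [if_pos hempty, if_pos (show String.ofList res = "" by rw [hempty])]
    · have hne2 : String.ofList res ≠ "" := by
        intro hcontra
        apply hempty
        have h5 := congrArg String.toList hcontra
        rw [String.toList_ofList] at h5
        exact h5.trans rfl
      rw [if_neg hempty, if_neg hne2]
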